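-- pv_equiv track=rewrite | github.com/ahyeon0508/Algorithm | 프로그래머스/위클리 챌린지/code/모음사전.py | solution
-- ===== SOURCE A (Python) =====
-- from itertools import product
--
-- def solution(word):
--     list1 = ['A','E','I','O','U']
--     list2 = list(map(list, product('AEIOU', repeat=2)))
--     list3 = list(map(list, product('AEIOU', repeat=3)))
--     list4 = list(map(list, product('AEIOU', repeat=4)))
--     list5 = list(map(list, product('AEIOU', repeat=5)))
--     data_list = list1 + list2 + list3 + list4 + list5
--     for i in range(len(data_list)):
--         data_list[i] = ''.join(data_list[i])
--     data_list.sort()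
--
--     return data_list.index(word)+1
-- ===== SOURCE B (Python) =====
-- def solution(word):
--     total = 0
--     for i, c in enumerate(word):
--         total += 'AEIOU'.index(c) * ((5 ** (5 - i) - 1) // 4) + 1
--     return total
-- ===== Notes on version B (the rewrite author's own statement) =====
-- stated objective: alternative
-- what changed: Instead of generating all 3905 vowel words of length 1..5, sorting them and linearly searching for the word, B computes the dictionary index in closed form: the letter at position i contributes rank*((5^(5-i)-1)//4)+1 to the sum.
import Mathlib
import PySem

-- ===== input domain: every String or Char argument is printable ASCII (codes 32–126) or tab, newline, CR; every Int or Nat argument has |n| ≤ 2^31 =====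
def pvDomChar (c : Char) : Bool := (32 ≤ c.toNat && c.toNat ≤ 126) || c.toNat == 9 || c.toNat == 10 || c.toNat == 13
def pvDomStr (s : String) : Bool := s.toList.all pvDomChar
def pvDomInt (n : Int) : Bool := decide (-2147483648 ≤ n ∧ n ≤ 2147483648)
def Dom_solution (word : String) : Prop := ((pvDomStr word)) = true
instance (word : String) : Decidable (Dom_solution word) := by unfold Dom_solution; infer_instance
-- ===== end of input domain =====

-- B replaces A's generate-all-words/sort/linear-search with a closed-form positional
-- weighting (per letter: rank * block-size + 1); objective: alternative (no dictionary is built).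


-- ===== PORT A =====
-- itertools.product('AEIOU', repeat=n) as lists of chars, in CPython's order
-- (last coordinate varies fastest).
def prodA : Nat → List (List Char)
  | 0 => [[]]
  | n + 1 => "AEIOU".toList.flatMap (fun c => (prodA n).map (fun t => c :: t))

def solution (word : String) : Int :=
  let list1 : List String := ["A", "E", "I", "O", "U"]
  -- Python joins every entry of data_list to a string before sorting; String.ofList is
  -- that ''.join, applied where the char lists are produced (list1 is already strings).
  let list2 : List String := (prodA 2).map String.ofList
  let list3 : List String := (prodA 3).map String.ofList
  let list4 : List String := (prodA 4).map String.ofList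
  let list5 : List String := (prodA 5).map String.ofList
  let data_list : List String := list1 ++ list2 ++ list3 ++ list4 ++ list5
  let sorted_list := PySem.List.sorted data_list (fun x => x)
  match PySem.List.index? sorted_list word with
  | some i => (i : Int) + 1
  | none => 0   -- Python raises ValueError here; excluded by Pre_solution

-- ===== PORT B =====
def solution_alt (word : String) : Int :=
  (PySem.List.enumerate word.toList).foldl
    (fun total ic =>
      total + PySem.Str.find "AEIOU" (String.ofList [ic.2]) *
          PySem.Int.floordiv ((5 : Int) ^ ((5 : Int) - ic.1).toNat - 1) 4 + 1)
    0

-- ===== PRECONDITION & SPEC =====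
-- Pre_ excludes exactly the words A raises ValueError on (data_list.index fails):
-- anything that is not a 1..5-letter word over 'AEIOU'.
def Pre_solution (word : String) : Prop :=
  1 ≤ word.toList.length ∧ word.toList.length ≤ 5 ∧
    word.toList.all (fun c => c ∈ (['A', 'E', 'I', 'O', 'U'] : List Char)) = true
instance (word : String) : Decidable (Pre_solution word) := by unfold Pre_solution; infer_instance
def pvWitness_solution : String := "EIO"

def Spec_solution (word : String) (out : Int) : Prop := out = solution_alt word
instance (word : String) (out : Int) : Decidable (Spec_solution word out) := by unfold Spec_solution; infer_instance

-- ===== CLAIM (what is proved, stated in full; the proofs are below) =====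
def Claim_equal_solution : Prop := ∀ (word : String), Dom_solution word → Pre_solution word → Spec_solution word (solution word)

-- ===== LEMMAS AND PROOFS =====

-- The five vowels.
def V : List Char := ['A', 'E', 'I', 'O', 'U']

-- The dictionary-order list of all words of length 1..n over V.
def canon : Nat → List (List Char)
  | 0 => []
  | n + 1 => V.flatMap (fun c => [c] :: (canon n).map (c :: ·))

-- A's data_list (as char lists), in generation order: prodA 1 ++ … ++ prodA n.
def up : Nat → List (List Char)
  | 0 => []
  | n + 1 => up n ++ prodA (n + 1)

-- up with the length-1 words stripped: prodA 2 ++ … ++ prodA (n+1).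
def ups : Nat → List (List Char)
  | 0 => []
  | n + 1 => ups n ++ prodA (n + 2)

def idxV (c : Char) : Nat := (PySem.List.index? V c).getD 0

-- rank l n = position of l in canon n (for nonempty valid l of length ≤ n).
def rank : List Char → Nat → Nat
  | [], _ => 0
  | c :: rest, n => idxV c * ((5 ^ n - 1) / 4) + (if rest = [] then 0 else 1 + rank rest (n - 1))

theorem index?_append_of_not_mem {α : Type} [BEq α] [LawfulBEq α] {l : List α} (t : List α)
    {v : α} (h : v ∉ l) :
    PySem.List.index? (l ++ t) v = (PySem.List.index? t v).map (· + l.length) := by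
  induction l with
  | nil => simp [Option.map_id']
  | cons x xs ih =>
    simp only [List.cons_append]
    rw [PySem.List.index?_cons_of_ne _ (by simp at h; exact (Ne.symm h.1)),
      ih (by simp at h; exact h.2)]
    simp only [Option.map_map, List.length_cons]
    rfl

theorem index?_map_inj {α β : Type} [BEq α] [LawfulBEq α] [BEq β] [LawfulBEq β]
    {f : α → β} (hf : Function.Injective f) (m : List α) (x : α) :
    PySem.List.index? (m.map f) (f x) = PySem.List.index? m x := by
  induction m with
  | nil => simp [PySem.List.index?]
  | cons y ys ih =>
    by_cases hy : y = x
    · subst hy; rw [List.map_cons, PySem.List.index?_cons_self, PySem.List.index?_cons_self]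
    · rw [List.map_cons, PySem.List.index?_cons_of_ne _ (fun he => hy (hf he)),
        PySem.List.index?_cons_of_ne _ hy, ih]

theorem canon_ne_nil : ∀ n, ∀ l ∈ canon n, l ≠ [] := by
  intro n
  induction n with
  | zero => simp [canon]
  | succ m ih =>
    intro l hl
    simp only [canon, List.mem_flatMap, List.mem_cons, List.mem_map] at hl
    obtain ⟨c, _, h⟩ := hl
    rcases h with h | ⟨w, _, h⟩
    · subst h; simp
    · rw [← h]; simp

theorem canon_len : ∀ n, 4 * (canon n).length + 5 = 5 ^ (n + 1) := by
  intro n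
  induction n with
  | zero => simp [canon]
  | succ m ih =>
    have : (canon (m+1)).length = 5 * (1 + (canon m).length) := by
      simp [canon, V]
      ring
    rw [this, pow_succ]
    omega

theorem up_eq : ∀ n, up (n + 1) = prodA 1 ++ ups n := by
  intro n
  induction n with
  | zero => simp [up, ups]
  | succ m ih => rw [up, ih, ups, List.append_assoc]

theorem flatMap_cons_ups : ∀ n, (V.flatMap (fun c => (up n).map (c :: ·))).Perm (ups n) := by
  intro n
  induction n with
  | zero => simp [up, ups]
  | succ m ih =>
    have h1 : (V.flatMap (fun c => (up (m+1)).map (c :: ·))).Perm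
        (V.flatMap (fun c => (up m).map (c :: ·)) ++ V.flatMap (fun c => (prodA (m+1)).map (c :: ·))) := by
      have hperm := (List.flatMap_append_perm V (fun c => (up m).map (c :: ·)) (fun c => (prodA (m+1)).map (c :: ·))).symm
      refine List.Perm.trans (List.Perm.of_eq ?_) hperm
      simp [up, List.map_append]
    have h2 : V.flatMap (fun c => (prodA (m+1)).map (c :: ·)) = prodA (m+2) := by
      rfl
    rw [ups]
    exact h1.trans (List.Perm.append ih (by rw [h2]))

theorem canon_perm : ∀ n, (canon n).Perm (up n) := by
  intro n
  induction n with
  | zero => simp [canon, up]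
  | succ m ih =>
    have h1 : (canon (m+1)).Perm (V.map (fun c => [c]) ++ V.flatMap (fun c => (canon m).map (c :: ·))) := by
      have hperm := (List.flatMap_append_perm V (fun c => [[c]]) (fun c => (canon m).map (c :: ·))).symm
      refine (List.Perm.of_eq ?_).trans (hperm.trans (List.Perm.append (List.Perm.of_eq ?_) (List.Perm.refl _)))
      · rfl
      · decide
    have h2 : (V.flatMap (fun c => (canon m).map (c :: ·))).Perm (ups m) := by
      refine List.Perm.trans ?_ (flatMap_cons_ups m)
      exact List.Perm.flatMap (List.Perm.refl V) (fun a _ => ih.map _)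
    have h3 : V.map (fun c => [c]) = prodA 1 := by decide
    rw [up_eq m, ← h3]
    exact h1.trans (List.Perm.append (List.Perm.refl _) h2)

theorem canon_pairwise : ∀ n, (canon n).Pairwise (fun a b => List.Lex (· < ·) a b) := by
  intro n
  induction n with
  | zero => simp [canon]
  | succ m ih =>
    rw [show canon (m+1) = V.flatMap (fun c => [c] :: (canon m).map (c :: ·)) from rfl]
    rw [List.pairwise_flatMap]
    constructor
    · intro c _
      constructor
      · intro w hw
        simp only [List.mem_map] at hw
        obtain ⟨v, hv, rfl⟩ := hw
        exact List.Lex.cons (by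
          cases v with
          | nil => exact absurd rfl (canon_ne_nil m _ hv)
          | cons a t => exact List.Lex.nil)
      · rw [List.pairwise_map]
        exact ih.imp (fun h => List.Lex.cons h)
    · have hV : V.Pairwise (· < ·) := by decide
      refine hV.imp_of_mem ?_
      intro c d _ _ hcd x hx y hy
      have hxc : ∃ t, x = c :: t := by
        rcases List.mem_cons.mp hx with h | h
        · exact ⟨[], h ▸ rfl⟩
        · simp only [List.mem_map] at h; obtain ⟨v, _, rfl⟩ := h; exact ⟨v, rfl⟩
      have hyd : ∃ t, y = d :: t := by
        rcases List.mem_cons.mp hy with h | h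
        · exact ⟨[], h ▸ rfl⟩
        · simp only [List.mem_map] at h; obtain ⟨v, _, rfl⟩ := h; exact ⟨v, rfl⟩
      obtain ⟨t1, rfl⟩ := hxc
      obtain ⟨t2, rfl⟩ := hyd
      exact List.Lex.rel hcd

-- index inside one block [c] :: (canon n).map (c::·)
theorem index?_block (c : Char) (rest : List Char) (n : Nat)
    (hr : PySem.List.index? (canon n) rest = some (rank rest n) ∨ rest = []) :
    PySem.List.index? ([c] :: (canon n).map (c :: ·)) (c :: rest)
      = some (if rest = [] then 0 else 1 + rank rest n) := by
  by_cases h : rest = []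
  · subst h; rw [if_pos rfl]; exact PySem.List.index?_cons_self _ _
  · rw [if_neg h]
    have hne : [c] ≠ c :: rest := by simp [h]
    rw [PySem.List.index?_cons_of_ne _ hne,
      show ((c :: rest)) = ((c :: ·) rest) from rfl,
      index?_map_inj (fun a b h => by simpa using h)]
    rcases hr with hr | hr
    · rw [hr]; simp [Nat.add_comm]
    · exact absurd hr h

-- scanning the flatMap of per-letter blocks of equal length B
theorem index?_flatMap (block : Char → List (List Char)) (t : List Char) (c : Char) (B j : Nat)
    (hlen : ∀ d, (block d).length = B)
    (hnot : ∀ d, d ≠ c → t ∉ block d) (hj : PySem.List.index? (block c) t = some j) :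
    ∀ (W : List Char), c ∈ W →
    PySem.List.index? (W.flatMap block) t = some ((W.idxOf c) * B + j) := by
  intro W
  induction W with
  | nil => simp
  | cons d W' ih =>
    intro hc
    by_cases hd : d = c
    · subst hd
      rw [List.flatMap_cons, PySem.List.index?_append_of_mem]
      · rw [hj, List.idxOf_cons_self]; simp
      · exact (PySem.List.index?_isSome_iff _ t).mp (by rw [hj]; rfl)
    · rw [List.flatMap_cons, index?_append_of_not_mem _ (hnot d hd),
        ih (List.mem_cons.mp hc |>.resolve_left (fun h => hd h.symm)),
        List.idxOf_cons_ne _ (by exact hd)]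
      simp [hlen d]
      ring

theorem idxV_eq (c : Char) (hc : c ∈ V) : V.idxOf c = idxV c := by
  have h5 : c = 'A' ∨ c = 'E' ∨ c = 'I' ∨ c = 'O' ∨ c = 'U' := by simpa [V] using hc
  rcases h5 with rfl | rfl | rfl | rfl | rfl <;> decide

theorem index?_canon : ∀ (l : List Char) (n : Nat), l ≠ [] → l.length ≤ n →
    (∀ c ∈ l, c ∈ V) → PySem.List.index? (canon n) l = some (rank l n) := by
  intro l
  induction l with
  | nil => intro n h; exact absurd rfl h
  | cons c rest ih =>
    intro n _ hlen hmem
    obtain ⟨m, rfl⟩ : ∃ m, n = m + 1 := by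
      cases n with
      | zero => simp at hlen
      | succ m => exact ⟨m, rfl⟩
    have hB : ∀ d : Char, (([d] : List Char) :: (canon m).map (d :: ·)).length = 1 + (canon m).length := by
      intro d; simp [Nat.add_comm]
    have hnot : ∀ d, d ≠ c → (c :: rest) ∉ (([d] : List Char) :: (canon m).map (d :: ·)) := by
      intro d hd hmem'
      rcases List.mem_cons.mp hmem' with h | h
      · simp only [List.cons.injEq] at h
        exact hd h.1.symm
      · simp only [List.mem_map] at h
        obtain ⟨w, _, hw⟩ := h
        simp only [List.cons.injEq] at hw
        exact hd hw.1
    have hr : PySem.List.index? (canon m) rest = some (rank rest m) ∨ rest = [] := by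
      by_cases h : rest = []
      · exact Or.inr h
      · exact Or.inl (ih m h (by simpa using hlen) (fun d hd => hmem d (List.mem_cons_of_mem _ hd)))
    have hj := index?_block c rest m hr
    have hc : c ∈ V := hmem c List.mem_cons_self
    have hfm := index?_flatMap (fun d => [d] :: (canon m).map (d :: ·)) (c :: rest) c
      (1 + (canon m).length) _ hB hnot hj V hc
    rw [show canon (m + 1) = V.flatMap (fun d => [d] :: (canon m).map (d :: ·)) from rfl, hfm]
    congr 1
    rw [idxV_eq c hc]
    have hl := canon_len m
    have hBval : 1 + (canon m).length = (5 ^ (m + 1) - 1) / 4 := by omega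
    simp only [rank, hBval]
    rcases em (rest = []) with he | he <;> simp [he]

theorem find_eq_idxV (c : Char) (hc : c ∈ V) :
    PySem.Str.find "AEIOU" (String.ofList [c]) = (idxV c : Int) := by
  have h5 : c = 'A' ∨ c = 'E' ∨ c = 'I' ∨ c = 'O' ∨ c = 'U' := by simpa [V] using hc
  rcases h5 with rfl | rfl | rfl | rfl | rfl <;> decide

theorem weight_eq (m : Nat) (hm : m + 1 ≤ 5) :
    PySem.Int.floordiv ((5 : Int) ^ ((5 : Int) - ((5 : Int) - (↑(m + 1) : Int))).toNat - 1) 4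
      = ((5 ^ (m + 1) - 1) / 4 : Nat) := by
  have h1 : ((5 : Int) - ((5 : Int) - (↑(m + 1) : Int))).toNat = m + 1 := by omega
  rw [h1]
  have h2 : (5 : Int) ^ (m + 1) - 1 = ((5 ^ (m + 1) - 1 : Nat) : Int) := by
    have : (1:Nat) ≤ 5 ^ (m+1) := Nat.one_le_pow _ _ (by norm_num)
    push_cast [this]; ring
  rw [h2]
  exact_mod_cast PySem.Int.floordiv_natCast (5 ^ (m + 1) - 1) 4

-- B's loop, for a suffix l of the word starting at absolute position 5 - n.
theorem alt_loop : ∀ (l : List Char) (n : Nat) (acc : Int), (∀ c ∈ l, c ∈ V) →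
    l.length ≤ n → n ≤ 5 →
    (PySem.List.enumerate l ((5 : Int) - n)).foldl
      (fun total ic =>
        total + PySem.Str.find "AEIOU" (String.ofList [ic.2]) *
            PySem.Int.floordiv ((5 : Int) ^ ((5 : Int) - ic.1).toNat - 1) 4 + 1)
      acc
      = acc + (rank l n : Int) + (if l = [] then 0 else 1) := by
  intro l
  induction l with
  | nil => intro n acc _ _ _; simp [PySem.List.enumerate, rank]
  | cons c rest ih =>
    intro n acc hmem hlen hn
    obtain ⟨m, rfl⟩ : ∃ m, n = m + 1 := by
      cases n with
      | zero => simp at hlen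
      | succ m => exact ⟨m, rfl⟩
    rw [show PySem.List.enumerate (c :: rest) ((5:Int) - ↑(m+1))
        = ((5:Int) - ↑(m+1), c) :: PySem.List.enumerate rest ((5:Int) - ↑(m+1) + 1) from by
      simp [PySem.List.enumerate]]
    rw [List.foldl_cons]
    have hstep : ((5:Int) - ↑(m+1) + 1) = (5:Int) - ↑m := by push_cast; ring
    rw [hstep]
    rw [ih m _ (fun d hd => hmem d (List.mem_cons_of_mem _ hd)) (by simpa using hlen) (by omega)]
    simp only [find_eq_idxV c (hmem c List.mem_cons_self), weight_eq m hn]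
    simp only [rank]
    rcases em (rest = []) with he | he <;> simp [he] <;> push_cast <;> ring

-- A's sorted data_list is exactly the dictionary-order list.
theorem sorted_data :
    PySem.List.sorted ((["A", "E", "I", "O", "U"] : List String) ++
      (prodA 2).map String.ofList ++ (prodA 3).map String.ofList ++
      (prodA 4).map String.ofList ++ (prodA 5).map String.ofList) (fun x => x)
      = (canon 5).map String.ofList := by
  apply PySem.List.sorted_eq_of_perm_of_pairwise_lt
  · refine ((canon_perm 5).map String.ofList).trans (List.Perm.of_eq ?_)
    have h1 : (prodA 1).map String.ofList = (["A", "E", "I", "O", "U"] : List String) := by decide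
    rw [show up 5 = (((([] ++ prodA 1) ++ prodA 2) ++ prodA 3) ++ prodA 4) ++ prodA 5 from rfl]
    simp only [List.map_append, List.nil_append, h1]
  · rw [List.pairwise_map]
    refine (canon_pairwise 5).imp ?_
    intro a b h
    rw [String.lt_iff_toList_lt]
    simpa only [String.toList_ofList] using h

-- ===== VERDICT (by name: the statement is the Claim_ definition above) =====
theorem solution_spec : Claim_equal_solution := by
  intro word _ hpre
  obtain ⟨h1, h2, h3⟩ := hpre
  have hmem : ∀ c ∈ word.toList, c ∈ V := by
    intro c hc
    have h := List.all_eq_true.mp h3 c hc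
    simpa [V] using h
  have hne : word.toList ≠ [] := by
    intro h; rw [h] at h1; simp at h1
  unfold Spec_solution solution solution_alt
  simp only []
  rw [sorted_data]
  rw [show word = String.ofList word.toList from (@String.ofList_toList word).symm,
    index?_map_inj (fun a b h => by
      have := congrArg String.toList h; simpa using this)]
  rw [String.toList_ofList]
  rw [index?_canon word.toList 5 hne h2 hmem]
  have halt := alt_loop word.toList 5 0 hmem h2 (le_refl 5)
  rw [show ((5:Int) - (5:Nat)) = 0 from by norm_num] at halt
  rw [halt, if_neg hne]
  push_cast
  ring
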